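-- pv_equiv track=rewrite | github.com/Runarok/GeeksForGeeks-solutions | Difficulty: Easy/Second Binary Digit/second-binary-digit.py | find
-- ===== SOURCE A (Python) =====
-- def find(A, B):
--     # Initialize the answer variable
--     ans = 0
--
--     # Handle the case where the range is small
--     if B - A < 10:
--         for num in range(A, B + 1):
--             num >>= 1  # Perform right shift (divide by 2)
--             ans += num & 1  # Check if the least significant bit is 1
--         return ans
--
--     # Adjust A if it is not divisible by 4, based on modulo conditions
--     if A % 4 == 1:
--         ans += 2
--         A += 3
--     elif A % 4 == 2:
--         ans += 2
--         A += 2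
--     elif A % 4 == 3:
--         ans += 1
--         A += 1
--
--     # Adjust B if it is not divisible by 4, based on modulo conditions
--     if B % 4 == 1:
--         B -= 1
--     elif B % 4 == 2:
--         ans += 1
--         B -= 2
--     elif B % 4 == 3:
--         ans += 2
--         B -= 3
--
--     # If A is less than B, calculate the count of 2-step increments in the range
--     if A < B:
--         ans += (B - A) // 2
--
--     return ans
-- ===== SOURCE B (Python) =====
-- def find(A, B):
--     # Bit 1 of n is set exactly when n % 4 is 2 or 3.  Count by prefix sums:
--     # below(x) = how many n < x have n % 4 in {2, 3}  (floor division, so exact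
--     # for negative x too); the answer is below(B + 1) - below(A).
--     def below(x):
--         return (x + 1) // 4 + x // 4
--
--     return below(B + 1) - below(A) if A <= B else 0
-- ===== Notes on version B (the rewrite author's own statement) =====
-- stated objective: simpler
-- what changed: Replaces A's two-regime code (a small-range bit-shift loop plus six residue-adjustment branches and a stride count) by a uniform closed-form prefix-count difference below(B+1)-below(A) with below(x)=(x+1)//4+x//4.
import Mathlib
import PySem

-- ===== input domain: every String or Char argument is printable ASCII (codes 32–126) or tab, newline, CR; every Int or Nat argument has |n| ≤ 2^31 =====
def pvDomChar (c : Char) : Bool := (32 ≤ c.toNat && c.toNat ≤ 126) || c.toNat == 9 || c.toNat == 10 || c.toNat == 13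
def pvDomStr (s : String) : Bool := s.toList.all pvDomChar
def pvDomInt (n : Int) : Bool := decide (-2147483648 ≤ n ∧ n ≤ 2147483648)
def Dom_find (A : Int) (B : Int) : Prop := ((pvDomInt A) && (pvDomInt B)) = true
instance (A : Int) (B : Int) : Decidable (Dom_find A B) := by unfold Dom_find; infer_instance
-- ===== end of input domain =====

-- B replaces A's two-regime code (small-range shift loop + six residue-adjustment branches)
-- by a uniform closed-form prefix-count difference; objective: simpler (not measurably faster).

-- ===== PORT A =====
def find (A : Int) (B : Int) : Int :=
  let ans : Int := 0
  if B - A < 10 then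
    -- for num in range(A, B + 1): num >>= 1; ans += num & 1
    (PySem.List.pyRange A (B + 1) 1).foldl
      (fun (ans num : Int) =>
        let num := num >>> (1 : Nat)
        ans + PySem.Int.band num 1) ans
  else
    -- adjust A (ans, A updated together, branches in source order)
    let sA : Int × Int :=
      if PySem.Int.mod A 4 == 1 then (ans + 2, A + 3)
      else if PySem.Int.mod A 4 == 2 then (ans + 2, A + 2)
      else if PySem.Int.mod A 4 == 3 then (ans + 1, A + 1)
      else (ans, A)
    let ans := sA.1
    let A := sA.2
    -- adjust B
    let sB : Int × Int :=
      if PySem.Int.mod B 4 == 1 then (ans, B - 1)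
      else if PySem.Int.mod B 4 == 2 then (ans + 1, B - 2)
      else if PySem.Int.mod B 4 == 3 then (ans + 2, B - 3)
      else (ans, B)
    let ans := sB.1
    let B := sB.2
    if A < B then ans + PySem.Int.floordiv (B - A) 2 else ans

-- ===== PORT B =====
def find_alt (A : Int) (B : Int) : Int :=
  -- below(x) = (x + 1) // 4 + x // 4
  let below : Int → Int := fun x => PySem.Int.floordiv (x + 1) 4 + PySem.Int.floordiv x 4
  if A ≤ B then below (B + 1) - below A else 0

-- ===== PRECONDITION & SPEC =====
def Spec_find (A : Int) (B : Int) (out : Int) : Prop := out = find_alt A B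
instance (A : Int) (B : Int) (out : Int) : Decidable (Spec_find A B out) := by unfold Spec_find; infer_instance

-- ===== CLAIM (what is proved, stated in full; the proofs are below) =====
def Claim_equal_find : Prop := ∀ (A : Int) (B : Int), Dom_find A B → Spec_find A B (find A B)

-- ===== LEMMAS AND PROOFS =====

-- bit 1 of n (Python (n >> 1) & 1) is 1 exactly when n % 4 ∈ {2, 3}
theorem pvBit1 (n : Int) :
    PySem.Int.band (n >>> (1 : Nat)) 1 =
      (if (PySem.Int.mod n 4 == 2 || PySem.Int.mod n 4 == 3) then 1 else 0) := by
  rw [PySem.Int.band_one, Int.shiftRight_eq_div_pow,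
      PySem.Int.mod_eq_emod_of_pos (by norm_num : (0:Int) < 2),
      PySem.Int.mod_eq_emod_of_pos (by norm_num : (0:Int) < 4)]
  simp only [beq_iff_eq, Bool.or_eq_true]
  norm_num
  split_ifs <;> omega

-- closed form for the count of n ∈ [a, b) with n % 4 ∈ {2, 3}
def pvF (x : Int) : Int := (x + 1) / 4 + x / 4

theorem pvCnt (n : ℕ) : ∀ b a : Int, b - a = n →
    ((PySem.List.pyRange a b 1).countP
        (fun n => PySem.Int.mod n 4 == 2 || PySem.Int.mod n 4 == 3) : Int) = pvF b - pvF a := by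
  induction n with
  | zero =>
      intro b a h
      rw [PySem.List.pyRange_one_eq_nil (by omega)]
      have : b = a := by omega
      simp [this]
  | succ n ih =>
      intro b a h
      have hb : b = (b - 1) + 1 := by omega
      rw [hb, PySem.List.pyRange_one_succ_right (show a ≤ b - 1 by omega), List.countP_append,
        List.countP_cons, List.countP_nil]
      push_cast
      rw [ih (b - 1) a (by omega)]
      simp only [PySem.Int.mod_eq_emod_of_pos (by norm_num : (0:Int) < 4), pvF]
      by_cases h2 : (b-1) % 4 = 2 ∨ (b-1) % 4 = 3
      · rcases h2 with h2 | h2 <;> simp [h2] <;> omega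
      · push Not at h2
        simp [h2.1, h2.2]
        omega

theorem find_alt_closed (A B : Int) (h : A ≤ B) : find_alt A B = pvF (B + 1) - pvF A := by
  simp only [find_alt, pvF, PySem.Int.floordiv_eq_ediv_of_pos (by norm_num : (0:Int) < 4),
    if_pos h]

-- the loop body of A's small branch, summed over [a, b), counts n with n % 4 ∈ {2, 3}
theorem pvLoop (a b : Int) :
    ((PySem.List.pyRange a b 1).foldl
      (fun (ans num : Int) =>
        let num := num >>> (1 : Nat)
        ans + PySem.Int.band num 1) 0) =
    ((PySem.List.pyRange a b 1).countP
        (fun n => PySem.Int.mod n 4 == 2 || PySem.Int.mod n 4 == 3) : Int) := by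
  have h1 :
      ((PySem.List.pyRange a b 1).foldl
        (fun (ans num : Int) =>
          let num := num >>> (1 : Nat)
          ans + PySem.Int.band num 1) 0) =
      ((PySem.List.pyRange a b 1).foldl
        (fun acc n =>
          if PySem.Int.mod n 4 == 2 || PySem.Int.mod n 4 == 3 then acc + 1 else acc) 0) :=
    PySem.List.foldl_congr_mem _ _ _ _ (by intro acc x _; simp only []; rw [pvBit1]; split_ifs <;> simp)
  rw [h1, PySem.List.foldl_count_if, zero_add]

-- ===== VERDICT (by name: the statement is the Claim_ definition above) =====
theorem find_spec : Claim_equal_find := by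
  intro A B _
  unfold Spec_find find
  by_cases hAB : A ≤ B
  · rw [find_alt_closed A B hAB]
    by_cases h : B - A < 10
    · simp only [h, if_true]
      rw [pvLoop, pvCnt (B + 1 - A).toNat (B + 1) A (by omega)]
    · simp only [h, if_false]
      simp only [beq_iff_eq, pvF,
        PySem.Int.mod_eq_emod_of_pos (by norm_num : (0:Int) < 4),
        PySem.Int.floordiv_eq_ediv_of_pos (by norm_num : (0:Int) < 2)]
      split_ifs <;> omega
  · -- empty range: A's small-range loop runs over no elements, B returns 0
    rw [if_pos (by omega : B - A < 10), PySem.List.pyRange_one_eq_nil (by omega)]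
    simp [find_alt, hAB]
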